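-- pv_equiv track=rewrite | github.com/LJungang/RTV-Bench | scripts/eval/compute_acc.py | parse_main_category
-- ===== SOURCE A (Python) =====
-- from typing import Any, Dict, Iterable, List, Optional, Tuple
--
-- MAIN_CATEGORIES = ("Object", "Action", "Event")
--
-- def parse_main_category(type_str: Any) -> Tuple[Optional[str], Optional[str]]:
--     """Parse main category (Object/Action/Event) from the `type` string."""
--     if not isinstance(type_str, str):
--         return None, None
--     for cat in MAIN_CATEGORIES:
--         prefix = f"{cat}-"
--         if type_str.startswith(prefix):
--             return cat, type_str[len(prefix):]
--     return None, None
-- ===== SOURCE B (Python) =====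
-- MAIN_CATEGORIES = ("Object", "Action", "Event")
--
-- def parse_main_category(type_str):
--     """Parse main category (Object/Action/Event) from the `type` string."""
--     if not isinstance(type_str, str):
--         return None, None
--     head, sep, rest = type_str.partition('-')
--     if sep and head in MAIN_CATEGORIES:
--         return head, rest
--     return None, None
-- ===== Notes on version B (the rewrite author's own statement) =====
-- stated objective: idiomatic
-- what changed: Replaces the loop over MAIN_CATEGORIES with per-category startswith/prefix-slice by a single partition at the first '-' followed by a membership test of the head in MAIN_CATEGORIES (valid because no category name is a prefix of another).
import Mathlib
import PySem

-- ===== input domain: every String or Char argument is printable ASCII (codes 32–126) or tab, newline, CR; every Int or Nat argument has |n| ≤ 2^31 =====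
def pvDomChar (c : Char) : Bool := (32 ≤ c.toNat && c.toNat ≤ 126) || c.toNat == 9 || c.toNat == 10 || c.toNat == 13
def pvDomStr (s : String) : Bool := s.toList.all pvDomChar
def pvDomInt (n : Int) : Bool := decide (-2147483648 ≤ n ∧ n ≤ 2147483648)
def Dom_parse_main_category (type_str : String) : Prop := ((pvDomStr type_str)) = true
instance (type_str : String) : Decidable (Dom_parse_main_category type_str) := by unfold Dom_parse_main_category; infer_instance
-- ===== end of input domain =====

-- B replaces A's loop over categories with startswith by one partition at the
-- first '-' plus a membership test (idiomatic; valid since no category name is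
-- a prefix of another). The isinstance guard is vacuous under the String type.

-- ===== PORT A =====
-- A loops over MAIN_CATEGORIES = ("Object", "Action", "Event") trying
-- type_str.startswith(cat + "-"); unrolled in the tuple's fixed order.
def parse_main_category (type_str : String) : Option String × Option String :=
  if PySem.Str.startswith type_str "Object-" then
    (some "Object", some (PySem.Str.slice type_str (some 7) none))
  else if PySem.Str.startswith type_str "Action-" then
    (some "Action", some (PySem.Str.slice type_str (some 7) none))
  else if PySem.Str.startswith type_str "Event-" then
    (some "Event", some (PySem.Str.slice type_str (some 6) none))
  else (none, none)

-- ===== PORT B =====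
-- head, sep, rest = type_str.partition('-'): find the first '-'; sep is ''
-- (falsy) iff find = -1, else head = type_str[:i], rest = type_str[i+1:].
def parse_main_category_alt (type_str : String) : Option String × Option String :=
  let i := PySem.Str.find type_str "-"
  if i = -1 then (none, none)
  else
    let head := PySem.Str.slice type_str none (some i)
    let rest := PySem.Str.slice type_str (some (i + 1)) none
    if head ∈ ["Object", "Action", "Event"] then (some head, some rest)
    else (none, none)

-- ===== PRECONDITION & SPEC =====
def Spec_parse_main_category (type_str : String) (out : Option String × Option String) : Prop := out = parse_main_category_alt type_str
instance (type_str : String) (out : Option String × Option String) : Decidable (Spec_parse_main_category type_str out) := by unfold Spec_parse_main_category; infer_instance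

-- ===== CLAIM (what is proved, stated in full; the proofs are below) =====
def Claim_equal_parse_main_category : Prop := ∀ (type_str : String), Dom_parse_main_category type_str → Spec_parse_main_category type_str (parse_main_category type_str)

-- ===== LEMMAS AND PROOFS =====

-- A dash-terminated word w (with '-' ∉ w) is a prefix of l iff the first '-'
-- of l sits exactly at index w.length and the text before it is w.
theorem prefix_dash_iff (w l : List Char) (hw : '-' ∉ w) :
    (w ++ ['-']) <+: l ↔
      PySem.Chars.find l ['-'] = (w.length : Int) ∧ l.take w.length = w := by
  constructor
  · rintro ⟨t, rfl⟩
    have hdrop : List.drop w.length (w ++ ['-'] ++ t) = '-' :: t := by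
      simp [List.append_assoc]
    have hinf : ['-'] <:+: (w ++ ['-'] ++ t) := by
      refine ⟨w, t, by simp⟩
    have h0 : 0 ≤ PySem.Chars.find (w ++ ['-'] ++ t) ['-'] :=
      (PySem.Chars.find_nonneg_iff _ _).mpr hinf
    obtain ⟨hpre, hmin⟩ := PySem.Chars.find_spec h0
    set m := (PySem.Chars.find (w ++ ['-'] ++ t) ['-']).toNat with hm
    have hle : m ≤ w.length := by
      by_contra hgt
      exact hmin w.length (by omega) ⟨t, by simpa using hdrop⟩
    have hge : w.length ≤ m := by
      by_contra hlt
      push_neg at hlt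
      obtain ⟨u, hu⟩ := hpre
      have : (List.drop m (w ++ ['-'] ++ t))[0]? = some '-' := by
        rw [← hu]; simp
      have hwm : (w ++ ['-'] ++ t)[m]? = some '-' := by
        simpa using this
      have : w[m]? = some '-' := by
        rw [← hwm]; simp [List.getElem?_append_left, hlt]
      exact hw (List.mem_of_getElem? this)
    have hmw : m = w.length := le_antisymm hle hge
    constructor
    · omega
    · simp [List.append_assoc]
  · rintro ⟨hf, htake⟩
    have h0 : 0 ≤ PySem.Chars.find l ['-'] := by rw [hf]; positivity
    obtain ⟨hpre, -⟩ := PySem.Chars.find_spec h0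
    rw [hf] at hpre
    simp only [Int.toNat_natCast] at hpre
    obtain ⟨u, hu⟩ := hpre
    refine ⟨u, ?_⟩
    calc w ++ ['-'] ++ u = l.take w.length ++ l.drop w.length := by
          rw [htake, List.append_assoc, hu]
      _ = l := List.take_append_drop _ _

-- If the prefix before the first '-' (at index n) equals w, then n = w.length.
theorem take_find_len (l w : List Char) (n : Nat)
    (hf : PySem.Chars.find l ['-'] = (n : Int)) (ht : l.take n = w) :
    n = w.length := by
  have h0 : 0 ≤ PySem.Chars.find l ['-'] := by rw [hf]; positivity
  obtain ⟨hpre, -⟩ := PySem.Chars.find_spec h0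
  rw [hf] at hpre
  simp only [Int.toNat_natCast] at hpre
  obtain ⟨u, hu⟩ := hpre
  have hlt : n < l.length := by
    by_contra hge
    push_neg at hge
    have : l.drop n = [] := List.drop_eq_nil_of_le hge
    rw [this] at hu; exact absurd hu (by simp)
  have := congrArg List.length ht
  simp [List.length_take] at this
  omega

theorem parse_eq (s : String) :
    parse_main_category s = parse_main_category_alt s := by
  unfold parse_main_category parse_main_category_alt
  simp only [PySem.Str.startswith_eq, PySem.Str.find_eq]
  simp only [show ("-".toList : List Char) = ['-'] from rfl,
    show ("Object-".toList : List Char) = "Object".toList ++ ['-'] from rfl,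
    show ("Action-".toList : List Char) = "Action".toList ++ ['-'] from rfl,
    show ("Event-".toList : List Char) = "Event".toList ++ ['-'] from rfl]
  by_cases hneg : PySem.Chars.find s.toList ['-'] = -1
  · -- no '-': every startswith fails, B takes its early (none, none)
    rw [if_pos hneg]
    have no_pre : ∀ w : List Char, '-' ∉ w → ¬ (w ++ ['-']) <+: s.toList := by
      intro w hw hpre
      have := ((prefix_dash_iff w s.toList hw).mp hpre).1
      omega
    have nO : ¬ PySem.Chars.startswith s.toList ("Object".toList ++ ['-']) = true := by
      rw [PySem.Chars.startswith_iff]; exact no_pre "Object".toList (by decide)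
    have nA : ¬ PySem.Chars.startswith s.toList ("Action".toList ++ ['-']) = true := by
      rw [PySem.Chars.startswith_iff]; exact no_pre "Action".toList (by decide)
    have nE : ¬ PySem.Chars.startswith s.toList ("Event".toList ++ ['-']) = true := by
      rw [PySem.Chars.startswith_iff]; exact no_pre "Event".toList (by decide)
    rw [if_neg nO, if_neg nA, if_neg nE]
  · rw [if_neg hneg]
    have h0 : 0 ≤ PySem.Chars.find s.toList ['-'] := by
      have := PySem.Chars.neg_one_le_find s.toList ['-']
      omega
    obtain ⟨n, hn⟩ : ∃ n : Nat, PySem.Chars.find s.toList ['-'] = (n : Int) :=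
      ⟨(PySem.Chars.find s.toList ['-']).toNat, by omega⟩
    rw [hn]
    -- identify B's head with a take, as a string equation
    have hhead : (PySem.Str.slice s none (some (n : Int))).toList =
        s.toList.take n := by
      rw [PySem.Str.toList_slice, PySem.Chars.slice_eq_listSlice,
        PySem.List.slice_to_natCast]
    have hrest : (PySem.Str.slice s (some ((n : Int) + 1)) none).toList =
        s.toList.drop (n + 1) := by
      have hcast : ((n : Int) + 1) = ((n + 1 : Nat) : Int) := by push_cast; ring
      rw [PySem.Str.toList_slice, PySem.Chars.slice_eq_listSlice, hcast,
        PySem.List.slice_from_natCast]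
    -- the three startswith conditions, rephrased by prefix_dash_iff + take_find_len
    have key : ∀ w : List Char, '-' ∉ w →
        (PySem.Chars.startswith s.toList (w ++ ['-']) = true ↔
          s.toList.take n = w) := by
      intro w hw
      rw [PySem.Chars.startswith_iff, prefix_dash_iff w s.toList hw]
      constructor
      · rintro ⟨hf, ht⟩
        have hn' : n = w.length := by
          have : (n : Int) = (w.length : Int) := by rw [← hn, hf]
          exact_mod_cast this
        rw [hn']; exact ht
      · intro ht
        have hlen : n = w.length := take_find_len s.toList w n hn ht
        exact ⟨by rw [← hlen]; exact hn, by rw [← hlen]; exact ht⟩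
    have kO := key "Object".toList (by decide)
    have kA := key "Action".toList (by decide)
    have kE := key "Event".toList (by decide)
    by_cases hO : s.toList.take n = "Object".toList
    · rw [if_pos (kO.mpr hO)]
      have hhs : PySem.Str.slice s none (some (n : Int)) = "Object" :=
        String.toList_inj.mp (by rw [hhead, hO])
      have hnl : n = 6 := take_find_len s.toList _ n hn hO
      simp only [hhs, List.mem_cons]
      rw [if_pos (by simp)]
      refine Prod.ext rfl ?_
      simp only [Option.some.injEq]
      refine String.toList_inj.mp ?_
      rw [hrest, hnl, PySem.Str.toList_slice, PySem.Chars.slice_eq_listSlice,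
        show ((7:Int)) = ((7:Nat):Int) from rfl, PySem.List.slice_from_natCast]
    · rw [if_neg (fun h => hO (kO.mp h))]
      by_cases hA : s.toList.take n = "Action".toList
      · rw [if_pos (kA.mpr hA)]
        have hhs : PySem.Str.slice s none (some (n : Int)) = "Action" :=
          String.toList_inj.mp (by rw [hhead, hA])
        have hnl : n = 6 := take_find_len s.toList _ n hn hA
        simp only [hhs, List.mem_cons]
        rw [if_pos (by simp)]
        refine Prod.ext rfl ?_
        simp only [Option.some.injEq]
        refine String.toList_inj.mp ?_
        rw [hrest, hnl, PySem.Str.toList_slice, PySem.Chars.slice_eq_listSlice,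
          show ((7:Int)) = ((7:Nat):Int) from rfl, PySem.List.slice_from_natCast]
      · rw [if_neg (fun h => hA (kA.mp h))]
        by_cases hE : s.toList.take n = "Event".toList
        · rw [if_pos (kE.mpr hE)]
          have hhs : PySem.Str.slice s none (some (n : Int)) = "Event" :=
            String.toList_inj.mp (by rw [hhead, hE])
          have hnl : n = 5 := take_find_len s.toList _ n hn hE
          simp only [hhs, List.mem_cons]
          rw [if_pos (by simp)]
          refine Prod.ext rfl ?_
          simp only [Option.some.injEq]
          refine String.toList_inj.mp ?_
          rw [hrest, hnl, PySem.Str.toList_slice, PySem.Chars.slice_eq_listSlice,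
            show ((6:Int)) = ((6:Nat):Int) from rfl, PySem.List.slice_from_natCast]
        · rw [if_neg (fun h => hE (kE.mp h))]
          have hne : PySem.Str.slice s none (some (n : Int)) ∉
              (["Object", "Action", "Event"] : List String) := by
            intro hmem
            simp only [List.mem_cons, List.not_mem_nil, or_false] at hmem
            rcases hmem with h | h | h
            · exact hO (by rw [← hhead, h])
            · exact hA (by rw [← hhead, h])
            · exact hE (by rw [← hhead, h])
          rw [if_neg hne]

-- ===== VERDICT (by name: the statement is the Claim_ definition above) =====
theorem parse_main_category_spec : Claim_equal_parse_main_category := by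
  intro s _
  exact parse_eq s
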